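-- pv_equiv track=rewrite | github.com/Airahull/AI-ML-Aspirant-Python-Developer. | DSA/day03slidingwindow.py | sum_of_subarray
-- ===== SOURCE A (Python) =====
-- def sum_of_subarray(arr,k):
--     n=len(arr)
--     if k>n:
--         return[]
--     #sum of first window
--     curentsum=sum(arr[:k])
--     res=[curentsum]
--
--     for i in range(k,n):
--         curentsum = curentsum +arr[i] - arr[i-k]
--
--         res.append(curentsum)
--     return res
-- ===== SOURCE B (Python) =====
-- def sum_of_subarray(arr, k):
--     n = len(arr)
--     if k > n:
--         return []
--     prefix = [0]
--     s = 0
--     for x in arr: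
--         s += x
--         prefix.append(s)
--     return [prefix[i + k] - prefix[i] for i in range(n - k + 1)]
-- ===== Notes on version B (the rewrite author's own statement) =====
-- stated objective: alternative
-- what changed: B builds a prefix-sum table once and reads each window sum as a difference of two table entries, instead of A's incremental add-new/subtract-old running window sum.
import Mathlib
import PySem

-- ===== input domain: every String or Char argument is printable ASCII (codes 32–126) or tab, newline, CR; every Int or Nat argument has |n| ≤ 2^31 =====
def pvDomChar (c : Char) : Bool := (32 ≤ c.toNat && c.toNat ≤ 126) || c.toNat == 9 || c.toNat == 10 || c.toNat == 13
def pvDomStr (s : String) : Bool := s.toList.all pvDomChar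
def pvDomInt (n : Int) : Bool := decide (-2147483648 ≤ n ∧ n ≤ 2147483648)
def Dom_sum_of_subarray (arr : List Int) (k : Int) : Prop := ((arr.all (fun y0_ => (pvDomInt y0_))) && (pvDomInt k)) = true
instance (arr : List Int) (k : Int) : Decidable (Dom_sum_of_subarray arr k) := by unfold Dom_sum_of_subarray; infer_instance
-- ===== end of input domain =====

-- B computes each window sum from a prefix-sum table instead of A's running window update; equivalent for k ≥ 0 (A raises IndexError for every negative k).


-- ===== PORT A =====
-- arr[i] and arr[i-k] are in range for every i in range(k, n) under Pre_ (0 ≤ k), so pyGetD with default 0 is exact there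
def sum_of_subarray (arr : List Int) (k : Int) : List Int :=
  let n : Int := arr.length
  if k > n then []
  else
    let curentsum : Int := (PySem.List.slice arr none (some k)).sum
    ((PySem.List.pyRange k n 1).foldl
      (fun (p : Int × List Int) i =>
        let c := p.1 + PySem.List.pyGetD arr i 0 - PySem.List.pyGetD arr (i - k) 0
        (c, p.2 ++ [c]))
      (curentsum, [curentsum])).2

-- ===== PORT B =====
-- prefix[i+k] and prefix[i] are in range for every i in range(n-k+1) under Pre_ (0 ≤ k), so pyGetD with default 0 is exact there
def sum_of_subarray_alt (arr : List Int) (k : Int) : List Int :=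
  let n : Int := arr.length
  if k > n then []
  else
    let pfx : List Int :=
      (arr.foldl (fun (p : List Int × Int) x => (p.1 ++ [p.2 + x], p.2 + x)) ([0], 0)).1
    (PySem.List.pyRange 0 (n - k + 1) 1).map
      (fun i => PySem.List.pyGetD pfx (i + k) 0 - PySem.List.pyGetD pfx i 0)

-- ===== PRECONDITION & SPEC =====
-- Pre_ excludes negative k, on which A always raises IndexError (arr[i-k] reads past the end on the last iteration).
def Pre_sum_of_subarray (arr : List Int) (k : Int) : Prop := 0 ≤ k
instance (arr : List Int) (k : Int) : Decidable (Pre_sum_of_subarray arr k) := by unfold Pre_sum_of_subarray; infer_instance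
def pvWitness_sum_of_subarray : List Int × Int := ([1, 2, 3], 2)
def Spec_sum_of_subarray (arr : List Int) (k : Int) (out : List Int) : Prop := out = sum_of_subarray_alt arr k
instance (arr : List Int) (k : Int) (out : List Int) : Decidable (Spec_sum_of_subarray arr k out) := by unfold Spec_sum_of_subarray; infer_instance

-- ===== CLAIM (what is proved, stated in full; the proofs are below) =====
def Claim_equal_sum_of_subarray : Prop := ∀ (arr : List Int) (k : Int), Dom_sum_of_subarray arr k → Pre_sum_of_subarray arr k → Spec_sum_of_subarray arr k (sum_of_subarray arr k)

-- ===== LEMMAS AND PROOFS =====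

-- the window sum both programs compute
def wsum (arr : List Int) (kn i : Nat) : Int := ((arr.drop i).take kn).sum

-- B's prefix-accumulating fold, characterised
theorem pfx_fold (l : List Int) (acc : List Int) (s : Int) :
    l.foldl (fun (p : List Int × Int) x => (p.1 ++ [p.2 + x], p.2 + x)) (acc, s)
      = (acc ++ (List.range l.length).map (fun j => s + (l.take (j+1)).sum), s + l.sum) := by
  induction l generalizing acc s with
  | nil => simp
  | cons x xs ih =>
    simp only [List.foldl_cons, ih (acc ++ [s + x]) (s + x), List.length_cons,
      List.range_succ_eq_map, List.map_cons, List.map_map]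
    simp only [Prod.mk.injEq]
    constructor
    · simp only [List.append_assoc, List.singleton_append, List.take_succ_cons, List.sum_cons]
      congr 2
      · simp
      · apply List.map_congr_left; intro j _; simp [Function.comp]; ring
    · simp [List.sum_cons]; ring

theorem pfx_getD (arr : List Int) (j : Nat) (hj : j ≤ arr.length) :
    PySem.List.pyGetD
      ((arr.foldl (fun (p : List Int × Int) x => (p.1 ++ [p.2 + x], p.2 + x)) ([0], 0)).1)
      (j : Int) 0 = (arr.take j).sum := by
  rw [pfx_fold]
  simp only [PySem.List.pyGetD_natCast]
  cases j with
  | zero => simp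
  | succ m =>
    have hm : m < arr.length := by omega
    rw [List.getD, List.getElem?_append_right (by simp)]
    simp [hm]

-- the step identity: sliding the window right by one
theorem wsum_step (arr : List Int) (kn m : Nat) (h : m + kn < arr.length) :
    wsum arr kn m + arr.getD (m + kn) 0 = arr.getD m 0 + wsum arr kn (m+1) := by
  have hm : m < arr.length := by omega
  have hdrop : arr.drop m = arr[m] :: arr.drop (m+1) := by
    rw [List.drop_eq_getElem_cons hm]
  have hkn : kn < (arr.drop m).length := by simp; omega
  have h1 : (arr.drop m).take (kn+1) = (arr.drop m).take kn ++ [(arr.drop m)[kn]] := by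
    rw [List.take_add_one, List.getElem?_eq_getElem hkn]; rfl
  have h2 : (arr.drop m).take (kn+1) = arr[m] :: (arr.drop (m+1)).take kn := by
    rw [hdrop, List.take_succ_cons]
  have hg : (arr.drop m)[kn] = arr[m + kn] := by
    rw [List.getElem_drop]
  have hsum := congrArg List.sum (h1.symm.trans h2)
  simp only [List.sum_append, List.sum_cons, List.sum_nil, hg] at hsum
  simp only [wsum, List.getD, List.getElem?_eq_getElem hm,
    List.getElem?_eq_getElem h, Option.getD_some]
  omega

-- A's fold, characterised: after m steps the result list is the first m+1 window sums
theorem afold (arr : List Int) (k : Int) (kn : Nat) (hk : k = (kn : Int)) (m : Nat)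
    (hm : m + kn ≤ arr.length) :
    (List.map (fun (j : Nat) => k + (j : Int)) (List.range m)).foldl
      (fun (p : Int × List Int) i =>
        (p.1 + PySem.List.pyGetD arr i 0 - PySem.List.pyGetD arr (i - k) 0,
         p.2 ++ [p.1 + PySem.List.pyGetD arr i 0 - PySem.List.pyGetD arr (i - k) 0]))
      (wsum arr kn 0, [wsum arr kn 0])
      = (wsum arr kn m, (List.range (m+1)).map (fun j => wsum arr kn j)) := by
  induction m with
  | zero => simp
  | succ m ih =>
    rw [List.range_succ, List.map_append, List.foldl_append, ih (by omega)]
    simp only [List.map_cons, List.map_nil, List.foldl_cons, List.foldl_nil]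
    simp only [Prod.mk.injEq]
    have h1 : PySem.List.pyGetD arr (k + (m : Int)) 0 = arr.getD (m + kn) 0 := by
      rw [hk]
      have : ((kn : Int) + (m : Int)) = ((m + kn : Nat) : Int) := by push_cast; ring
      rw [this, PySem.List.pyGetD_natCast]
    have h2 : PySem.List.pyGetD arr (k + (m : Int) - k) 0 = arr.getD m 0 := by
      have : (k + (m : Int) - k) = ((m : Nat) : Int) := by ring
      rw [this, PySem.List.pyGetD_natCast]
    have hstep := wsum_step arr kn m (by omega)
    constructor
    · simp only [h1, h2]; omega
    · rw [List.range_succ (n := m + 1), List.map_append]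
      simp only [List.map_cons, List.map_nil, h1, h2]
      congr 2
      omega

-- both sides reduced to the same map of window sums
theorem b_eq (arr : List Int) (k : Int) (kn : Nat) (hk : k = (kn : Int))
    (hkn : kn ≤ arr.length) :
    sum_of_subarray_alt arr k
      = (List.range (arr.length - kn + 1)).map (fun j => wsum arr kn j) := by
  unfold sum_of_subarray_alt
  rw [if_neg (by omega)]
  rw [PySem.List.pyRange_one, List.map_map]
  have hlen : ((arr.length : Int) - k + 1 - 0).toNat = arr.length - kn + 1 := by omega
  rw [hlen]
  apply List.map_congr_left
  intro j hj
  rw [List.mem_range] at hj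
  simp only [Function.comp]
  have h1 : (0 + (j : Int) + k) = ((j + kn : Nat) : Int) := by rw [hk]; push_cast; ring
  have h2 : (0 + (j : Int)) = ((j : Nat) : Int) := by ring
  rw [h1, h2, pfx_getD arr (j + kn) (by omega), pfx_getD arr j (by omega)]
  have : arr.take (j + kn) = arr.take j ++ (arr.drop j).take kn := by
    rw [← List.take_add]
  rw [this, List.sum_append, wsum]
  ring

theorem a_eq (arr : List Int) (k : Int) (kn : Nat) (hk : k = (kn : Int))
    (hkn : kn ≤ arr.length) :
    sum_of_subarray arr k
      = (List.range (arr.length - kn + 1)).map (fun j => wsum arr kn j) := by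
  unfold sum_of_subarray
  rw [if_neg (by omega)]
  have hcur : (PySem.List.slice arr none (some k)).sum = wsum arr kn 0 := by
    rw [hk, PySem.List.slice_to_natCast]
    simp [wsum]
  simp only [hcur]
  rw [PySem.List.pyRange_one]
  have hlen : ((arr.length : Int) - k).toNat = arr.length - kn := by omega
  rw [hlen, afold arr k kn hk (arr.length - kn) (by omega)]

-- ===== VERDICT (by name: the statement is the Claim_ definition above) =====
theorem sum_of_subarray_spec : Claim_equal_sum_of_subarray := by
  intro arr k _ hpre
  unfold Spec_sum_of_subarray
  by_cases hgt : k > (arr.length : Int)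
  · unfold sum_of_subarray sum_of_subarray_alt
    rw [if_pos hgt, if_pos hgt]
  · have hpre' : 0 ≤ k := hpre
    have hk : k = (k.toNat : Int) := by omega
    have hkn : k.toNat ≤ arr.length := by omega
    rw [a_eq arr k k.toNat hk hkn, b_eq arr k k.toNat hk hkn]
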